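-- pv_equiv track=rewrite | github.com/targuy/GP-Presets-Converter | src/gp_presets_converter/utils/validation.py | sanitize_preset_name
-- ===== SOURCE A (Python) =====
-- def sanitize_preset_name(name: str) -> str:
--     """
--     Sanitize a preset name by removing invalid characters.
--
--     Args:
--         name: Preset name to sanitize
--
--     Returns:
--         Sanitized preset name
--     """
--     # Remove invalid characters
--     invalid_chars = ['/', '\\', ':', '*', '?', '"', '<', '>', '|']
--     sanitized = name
--     for char in invalid_chars:
--         sanitized = sanitized.replace(char, '_')
--
--     # Trim to max length
--     sanitized = sanitized[:64]
--
--     # Ensure not empty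
--     if not sanitized.strip():
--         sanitized = "Unnamed Preset"
--
--     return sanitized
-- ===== SOURCE B (Python) =====
-- _INVALID = '/\\:*?"<>|'
--
--
-- def sanitize_preset_name(name: str) -> str:
--     """Sanitize a preset name in one explicit loop: map invalid chars to '_',
--     stop collecting at 64 chars, and track non-whitespace on the fly."""
--     out = []
--     visible = False
--     for c in name:
--         if len(out) == 64:
--             break
--         if c in _INVALID:
--             c = '_'
--         if not c.isspace():
--             visible = True
--         out.append(c)
--     return ''.join(out) if visible else "Unnamed Preset"
-- ===== Notes on version B (the rewrite author's own statement) =====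
-- stated objective: alternative
-- what changed: Replaces A's nine full-string replace() scans plus a slice plus a strip() pass by one explicit loop with an accumulator that maps each character, truncates at 64 during the pass, and tracks whether any kept character is non-whitespace, so no slice or strip pass is needed.
import Mathlib
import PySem

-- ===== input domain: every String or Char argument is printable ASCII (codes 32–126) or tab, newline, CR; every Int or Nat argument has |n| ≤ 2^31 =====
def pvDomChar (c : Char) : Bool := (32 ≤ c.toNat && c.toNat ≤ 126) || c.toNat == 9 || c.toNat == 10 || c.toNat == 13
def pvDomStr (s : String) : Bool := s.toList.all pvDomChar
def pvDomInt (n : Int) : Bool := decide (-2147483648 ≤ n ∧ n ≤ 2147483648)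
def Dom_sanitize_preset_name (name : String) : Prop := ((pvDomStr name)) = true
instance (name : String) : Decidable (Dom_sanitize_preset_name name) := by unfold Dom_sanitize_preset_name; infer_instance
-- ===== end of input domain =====

-- B replaces A's nine full-string replace() scans + slice + strip() pass by one explicit loop with an accumulator that maps, truncates at 64 and tracks non-whitespace on the fly (objective: alternative).


-- ===== PORT A =====
-- invalid_chars = ['/', '\\', ':', '*', '?', '"', '<', '>', '|']
def pvInvalidChars : List Char := ['/', '\\', ':', '*', '?', '"', '<', '>', '|']

def sanitize_preset_name (name : String) : String :=
  -- for char in invalid_chars: sanitized = sanitized.replace(char, '_')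
  let sanitized := pvInvalidChars.foldl
    (fun s ch => PySem.Str.replace s (String.ofList [ch]) "_") name
  -- sanitized = sanitized[:64]
  let sanitized := PySem.Str.slice sanitized none (some 64)
  -- if not sanitized.strip(): sanitized = "Unnamed Preset"
  if (PySem.Str.strip sanitized).toList = [] then "Unnamed Preset" else sanitized

-- ===== PORT B =====
-- _INVALID = '/\\:*?"<>|'
def pvINVALID : List Char := "/\\:*?\"<>|".toList


-- the for-loop of Source B: remaining = 64 - len(out); out is built reversed and flipped at the end
def pvSanLoop : List Char → Nat → Bool → List Char → Bool × List Char
  | [], _, visible, out => (visible, out.reverse)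
  | c :: rest, k, visible, out =>
    match k with
    | 0 => (visible, out.reverse)          -- len(out) == 64: break
    | k + 1 =>
      let c' := if pvINVALID.contains c then '_' else c
      pvSanLoop rest k (visible || !PySem.Chars.isspace c') (c' :: out)

def sanitize_preset_name_alt (name : String) : String :=
  let r := pvSanLoop name.toList 64 false []
  if r.1 then String.ofList r.2 else "Unnamed Preset"

-- ===== PRECONDITION & SPEC =====
def Spec_sanitize_preset_name (name : String) (out : String) : Prop := out = sanitize_preset_name_alt name
instance (name : String) (out : String) : Decidable (Spec_sanitize_preset_name name out) := by unfold Spec_sanitize_preset_name; infer_instance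

-- ===== CLAIM (what is proved, stated in full; the proofs are below) =====
def Claim_equal_sanitize_preset_name : Prop := ∀ (name : String), Dom_sanitize_preset_name name → Spec_sanitize_preset_name name (sanitize_preset_name name)

-- ===== LEMMAS AND PROOFS =====

theorem pvINVALID_eq : pvINVALID = ['/', '\\', ':', '*', '?', '"', '<', '>', '|'] := by rfl

def pvMapChar (c : Char) : Char := if pvINVALID.contains c then '_' else c

-- replacing a single character by a single character is a character map
theorem replace_go_single (c d : Char) : ∀ (l : List Char) (fuel : Nat) (acc : List Char),
    l.length ≤ fuel →
    PySem.Chars.replace.go [c] [d] fuel l acc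
      = acc.reverse ++ l.map (fun x => if x = c then d else x) := by
  intro l
  induction l with
  | nil => intro fuel acc _; cases fuel <;> simp [PySem.Chars.replace.go]
  | cons x t ih =>
    intro fuel acc hle
    cases fuel with
    | zero => simp at hle
    | succ n =>
      simp only [PySem.Chars.replace.go]
      by_cases hx : x = c
      · subst hx
        simp only [List.isPrefixOf]
        simp only [beq_self_eq_true, Bool.true_and, if_true]
        rw [show List.drop [x].length (x :: t) = t from rfl,
            ih n ([d].reverse ++ acc) (by simpa using Nat.le_of_succ_le_succ hle)]
        simp
      · have : ([c].isPrefixOf (x :: t)) = false := by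
          simp [List.isPrefixOf]
          exact fun h => absurd h.symm hx
        rw [this]
        simp only [Bool.false_eq_true, if_false]
        rw [ih n (x :: acc) (by simpa using Nat.le_of_succ_le_succ hle)]
        simp [hx]

theorem replace_single (s : List Char) (c d : Char) :
    PySem.Chars.replace s [c] [d] = s.map (fun x => if x = c then d else x) := by
  simp [PySem.Chars.replace, replace_go_single c d s s.length [] (le_refl _)]

-- the nine successive single-character replaces equal one character map
set_option maxRecDepth 8000 in
theorem foldl_replace_eq_map (s : List Char) :
    pvInvalidChars.foldl (fun l ch => PySem.Chars.replace l [ch] ['_']) s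
      = s.map pvMapChar := by
  simp only [pvInvalidChars, List.foldl_cons, List.foldl_nil, replace_single, List.map_map]
  apply List.map_congr_left
  intro c _
  by_cases h : pvINVALID.contains c = true
  · have hm : c = '/' ∨ c = '\\' ∨ c = ':' ∨ c = '*' ∨ c = '?' ∨ c = '"' ∨
        c = '<' ∨ c = '>' ∨ c = '|' := by
      rw [pvINVALID_eq, List.contains_eq_mem, decide_eq_true_iff] at h
      simpa using h
    rcases hm with rfl | rfl | rfl | rfl | rfl | rfl | rfl | rfl | rfl <;> decide
  · have hm : ¬(c = '/' ∨ c = '\\' ∨ c = ':' ∨ c = '*' ∨ c = '?' ∨ c = '"' ∨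
        c = '<' ∨ c = '>' ∨ c = '|') := by
      rw [pvINVALID_eq, List.contains_eq_mem, decide_eq_true_iff] at h
      simpa using h
    push Not at hm
    obtain ⟨n1, n2, n3, n4, n5, n6, n7, n8, n9⟩ := hm
    have hnm : c ∉ pvINVALID := by
      simp [pvINVALID_eq]
      exact ⟨n1, n2, n3, n4, n5, n6, n7, n8, n9⟩
    simp [Function.comp, pvMapChar, hnm, n1, n2, n3, n4, n5, n6, n7, n8, n9]

-- A's sanitized string (before the fallback) is the truncated map
theorem sanitized_toList_eq (name : String) :
    (PySem.Str.slice (pvInvalidChars.foldl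
        (fun s ch => PySem.Str.replace s (String.ofList [ch]) "_") name) none (some 64)).toList
      = (name.toList.map pvMapChar).take 64 := by
  have key : (pvInvalidChars.foldl
      (fun s ch => PySem.Str.replace s (String.ofList [ch]) "_") name).toList
      = pvInvalidChars.foldl (fun l ch => PySem.Chars.replace l [ch] ['_']) name.toList := by
    generalize name = s
    show (List.foldl _ s pvInvalidChars).toList = _
    rw [show pvInvalidChars = ['/', '\\', ':', '*', '?', '"', '<', '>', '|'] from rfl]
    simp only [List.foldl_cons, List.foldl_nil, PySem.Str.toList_replace]
    rfl
  rw [PySem.Str.toList_slice, key, foldl_replace_eq_map]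
  exact PySem.List.slice_to _ (by norm_num)

-- B's loop computes: visible OR some kept mapped char is non-space, and the first k mapped chars
theorem pvSanLoop_eq : ∀ (l : List Char) (k : Nat) (visible : Bool) (out : List Char),
    pvSanLoop l k visible out
      = (visible || ((l.take k).map pvMapChar).any (fun c => !PySem.Chars.isspace c),
         out.reverse ++ (l.take k).map pvMapChar) := by
  intro l
  induction l with
  | nil => intro k visible out; cases k <;> simp [pvSanLoop]
  | cons c rest ih =>
    intro k visible out
    cases k with
    | zero => simp [pvSanLoop]
    | succ k =>
      simp only [pvSanLoop, ih, List.take_succ_cons, List.map_cons, List.any_cons,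
        List.reverse_cons, pvMapChar]
      simp [Bool.or_assoc]

-- strip is empty iff every character is whitespace
theorem strip_eq_nil_iff (s : List Char) :
    PySem.Chars.strip s = [] ↔ ∀ c ∈ s, PySem.Chars.isspace c = true := by
  unfold PySem.Chars.strip PySem.Chars.rstrip PySem.Chars.lstrip
  rw [List.reverse_eq_nil_iff, List.dropWhile_eq_nil_iff, ]
  constructor
  · intro h c hc
    rcases List.mem_append.mp
        ((List.takeWhile_append_dropWhile (p := PySem.Chars.isspace) (l := s)) ▸ hc) with h1 | h1
    · exact List.mem_takeWhile_imp h1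
    · exact h c (List.mem_reverse.mpr h1)
  · intro h c hc
    exact h c (List.Sublist.mem (List.mem_reverse.mp hc) (List.dropWhile_sublist _))

-- ===== VERDICT (by name: the statement is the Claim_ definition above) =====
theorem sanitize_preset_name_spec : Claim_equal_sanitize_preset_name := by
  intro name _
  unfold Spec_sanitize_preset_name sanitize_preset_name sanitize_preset_name_alt
  rw [pvSanLoop_eq]
  simp only [Bool.false_or, List.reverse_nil, List.nil_append]
  set m := (name.toList.take 64).map pvMapChar with hm
  have hA : (PySem.Str.slice (pvInvalidChars.foldl
      (fun s ch => PySem.Str.replace s (String.ofList [ch]) "_") name) none (some 64)) 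
      = String.ofList m := by
    apply String.toList_inj.mp
    rw [sanitized_toList_eq, hm, List.map_take]
    simp
  rw [hA]
  by_cases hv : m.any (fun c => !PySem.Chars.isspace c) = true
  · have : ¬ (PySem.Chars.strip m = []) := by
      rw [strip_eq_nil_iff]
      obtain ⟨c, hc, hns⟩ := List.any_eq_true.mp hv
      intro h
      simp [h c hc] at hns
    simp only [PySem.Str.toList_strip, String.toList_ofList]
    rw [if_neg this, if_pos hv]
  · have : PySem.Chars.strip m = [] := by
      rw [strip_eq_nil_iff]
      intro c hc
      by_contra hns
      exact hv (List.any_eq_true.mpr ⟨c, hc, by simp [hns]⟩)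
    simp only [PySem.Str.toList_strip, String.toList_ofList]
    rw [if_pos this, if_neg (by simp [hv])]
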